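-- pv_equiv track=rewrite | github.com/xuanpan/rebase-agent | core/question_engine.py | _extract_question_from_response
-- ===== SOURCE A (Python) =====
-- from typing import Dict, Any, List, Optional, Tuple
--
-- def _extract_question_from_response(response_content: str) -> Optional[str]:
--     """Extract a clean question from LLM response."""
--     # Remove any markdown, numbering, or extra formatting
--     lines = response_content.strip().split('\n')
--
--     for line in lines:
--         line = line.strip()
--         # Skip empty lines, headers, numbering
--         if not line or line.startswith('#') or line.startswith('**'):
--             continue
--         # Remove common prefixes
--         line = line.lstrip('1234567890.-• ')
--         if line.endswith('?'):
--             return line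
--
--     # Fallback: return first non-empty line if it looks like a question
--     for line in lines:
--         line = line.strip().lstrip('1234567890.-• ')
--         if line and len(line) > 10:  # Reasonable question length
--             return line
--
--     return None
-- ===== SOURCE B (Python) =====
-- from typing import Optional
--
-- def _extract_question_from_response(response_content: str) -> Optional[str]:
--     """Extract a clean question from LLM response (single pass with fallback)."""
--     fallback = None
--     for raw in response_content.strip().split('\n'):
--         s = raw.strip()
--         if s and not s.startswith('#') and not s.startswith('**'):
--             q = s.lstrip('1234567890.-\u2022 ')
--             if q.endswith('?'):
--                 return q
--         if fallback is None:
--             f = s.lstrip('1234567890.-\u2022 ')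
--             if f and len(f) > 10:
--                 fallback = f
--     return fallback
-- ===== Notes on version B (the rewrite author's own statement) =====
-- stated objective: alternative
-- what changed: Replaced A's two sequential passes over the lines (question scan, then fallback scan) by a single pass that maintains an Option fallback accumulator and returns a question immediately.
import Mathlib
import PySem

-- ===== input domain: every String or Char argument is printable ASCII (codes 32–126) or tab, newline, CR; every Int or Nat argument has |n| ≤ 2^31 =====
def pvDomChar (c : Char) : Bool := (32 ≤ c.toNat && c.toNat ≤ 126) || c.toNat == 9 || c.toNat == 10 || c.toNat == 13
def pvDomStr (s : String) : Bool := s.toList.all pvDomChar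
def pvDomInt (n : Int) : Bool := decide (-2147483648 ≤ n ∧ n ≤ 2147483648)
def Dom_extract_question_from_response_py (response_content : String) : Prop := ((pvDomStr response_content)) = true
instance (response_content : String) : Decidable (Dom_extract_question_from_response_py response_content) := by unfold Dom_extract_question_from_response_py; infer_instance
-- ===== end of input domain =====

-- B does the same job in ONE pass over the lines, carrying the fallback as an Option accumulator,
-- instead of A's two sequential passes; return value only, no side effects.

-- s.lstrip('1234567890.-• ') ported by hand (PySem has no lstrip-with-chars): exact — Python's
-- lstrip(chars) drops the longest prefix of characters belonging to the set.
def pyLstripPrefixes (s : String) : String :=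
  String.ofList (s.toList.dropWhile (fun c => "1234567890.-• ".toList.contains c))

-- ===== PORT A =====
-- first loop of A
def aLoop1 : List String → Option String
  | [] => none
  | l :: rest =>
    let line := PySem.Str.strip l
    if line = "" || PySem.Str.startswith line "#" || PySem.Str.startswith line "**" then
      aLoop1 rest
    else
      let line2 := pyLstripPrefixes line
      if PySem.Str.endswith line2 "?" then some line2 else aLoop1 rest

-- second (fallback) loop of A
def aLoop2 : List String → Option String
  | [] => none
  | l :: rest =>
    let line := pyLstripPrefixes (PySem.Str.strip l)
    if line ≠ "" ∧ line.length > 10 then some line else aLoop2 rest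

def extract_question_from_response_py (response_content : String) : Option String :=
  let lines := (PySem.Str.split? (PySem.Str.strip response_content) "\n").getD []
  match aLoop1 lines with
  | some q => some q
  | none => aLoop2 lines

-- ===== PORT B =====
def bLoop : List String → Option String → Option String
  | [], fallback => fallback
  | raw :: rest, fallback =>
    let s := PySem.Str.strip raw
    let hit : Option String :=
      if s ≠ "" ∧ ¬ PySem.Str.startswith s "#" = true ∧ ¬ PySem.Str.startswith s "**" = true then
        let q := pyLstripPrefixes s
        if PySem.Str.endswith q "?" then some q else none
      else none
    match hit with
    | some q => some q
    | none =>
      let fallback' :=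
        if fallback.isNone then
          let f := pyLstripPrefixes s
          if f ≠ "" ∧ f.length > 10 then some f else fallback
        else fallback
      bLoop rest fallback'

def extract_question_from_response_py_alt (response_content : String) : Option String :=
  bLoop ((PySem.Str.split? (PySem.Str.strip response_content) "\n").getD []) none

-- ===== PRECONDITION & SPEC =====
def Spec_extract_question_from_response_py (response_content : String) (out : Option String) : Prop := out = extract_question_from_response_py_alt response_content
instance (response_content : String) (out : Option String) : Decidable (Spec_extract_question_from_response_py response_content out) := by unfold Spec_extract_question_from_response_py; infer_instance

-- ===== CLAIM (what is proved, stated in full; the proofs are below) =====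
def Claim_equal_extract_question_from_response_py : Prop := ∀ (response_content : String), Dom_extract_question_from_response_py response_content → Spec_extract_question_from_response_py response_content (extract_question_from_response_py response_content)

-- ===== LEMMAS AND PROOFS =====
-- Invariant of B's single pass: with fallback accumulator fb it computes A's loop1 result,
-- else fb, else A's loop2 result.
theorem bLoop_invariant (lines : List String) (fb : Option String) :
    bLoop lines fb =
      match aLoop1 lines with
      | some q => some q
      | none => match fb with
        | some f => some f
        | none => aLoop2 lines := by
  induction lines generalizing fb with
  | nil => cases fb <;> simp [bLoop, aLoop1, aLoop2]
  | cons l rest ih =>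
    simp only [bLoop, aLoop1, aLoop2, ih]
    by_cases h1 : PySem.Str.strip l = "" <;>
      by_cases h2 : PySem.Str.startswith (PySem.Str.strip l) "#" = true <;>
        by_cases h3 : PySem.Str.startswith (PySem.Str.strip l) "**" = true <;>
          cases fb <;>
            simp [h1] <;>
              split_ifs <;> simp_all

-- ===== VERDICT (by name: the statement is the Claim_ definition above) =====
theorem extract_question_from_response_py_spec : Claim_equal_extract_question_from_response_py := by
  intro rc _
  unfold Spec_extract_question_from_response_py extract_question_from_response_py
    extract_question_from_response_py_alt
  rw [bLoop_invariant]
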